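-- pv_equiv track=rewrite | github.com/ansible/ansible | lib/ansible/modules/cloud/amazon/efs_info.py | prefix_to_attr
-- ===== SOURCE A (Python) =====
-- def prefix_to_attr(attr_id):
--     """
--     Helper method to convert ID prefix to mount target attribute
--     """
--     attr_by_prefix = {
--         'fsmt-': 'mount_target_id',
--         'subnet-': 'subnet_id',
--         'eni-': 'network_interface_id',
--         'sg-': 'security_groups'
--     }
--     return first_or_default([attr_name for (prefix, attr_name) in attr_by_prefix.items()
--                              if str(attr_id).startswith(prefix)], 'ip_address')
--
-- def first_or_default(items, default=None):
--     """
--     Helper method to fetch first element of list (if exists)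
--     """
--     for item in items:
--         return item
--     return default
-- ===== SOURCE B (Python) =====
-- def prefix_to_attr(attr_id):
--     """
--     Helper method to convert ID prefix to mount target attribute
--     """
--     attr_by_prefix = {
--         'fsmt-': 'mount_target_id',
--         'subnet-': 'subnet_id',
--         'eni-': 'network_interface_id',
--         'sg-': 'security_groups'
--     }
--     head, sep, _tail = str(attr_id).partition('-')
--     return attr_by_prefix.get(head + sep, 'ip_address')
-- ===== Notes on version B (the rewrite author's own statement) =====
-- stated objective: idiomatic
-- what changed: Instead of scanning all four dict entries and testing startswith against each prefix, B extracts the candidate key once via str.partition (the token up to and including the first dash) and does a single dict lookup with the same default.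
import Mathlib
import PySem

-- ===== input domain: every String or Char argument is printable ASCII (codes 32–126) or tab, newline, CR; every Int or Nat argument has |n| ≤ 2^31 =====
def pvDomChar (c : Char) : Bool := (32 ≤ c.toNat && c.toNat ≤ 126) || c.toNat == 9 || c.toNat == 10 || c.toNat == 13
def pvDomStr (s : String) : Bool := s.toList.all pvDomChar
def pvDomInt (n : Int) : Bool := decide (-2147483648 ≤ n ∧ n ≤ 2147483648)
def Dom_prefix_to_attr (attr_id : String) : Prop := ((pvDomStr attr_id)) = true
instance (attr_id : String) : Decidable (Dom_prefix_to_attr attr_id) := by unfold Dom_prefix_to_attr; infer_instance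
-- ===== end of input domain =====

-- B replaces A's linear scan over the prefix dict (startswith on every key) by extracting the
-- candidate key once ('token up to and including the first dash') and doing one dict lookup (objective: idiomatic).

-- ===== PORT A =====
def first_or_default (items : List String) (default : String) : String :=
  match items with
  | item :: _ => item
  | [] => default

def prefix_to_attr (attr_id : String) : String :=
  let attr_by_prefix : PySem.Dict String String := PySem.Dict.ofList
    [("fsmt-", "mount_target_id"), ("subnet-", "subnet_id"),
     ("eni-", "network_interface_id"), ("sg-", "security_groups")]
  first_or_default
    ((attr_by_prefix.items.filter (fun p => PySem.Str.startswith attr_id p.1)).map (·.2))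
    "ip_address"

-- ===== PORT B =====
-- str.partition('-') ported by hand (exact for a single-char separator: head = the chars before
-- the first '-', sep = "-" if a '-' occurs else ""); the tail is unused by B.
def prefix_to_attr_alt (attr_id : String) : String :=
  let attr_by_prefix : PySem.Dict String String := PySem.Dict.ofList
    [("fsmt-", "mount_target_id"), ("subnet-", "subnet_id"),
     ("eni-", "network_interface_id"), ("sg-", "security_groups")]
  let cs := attr_id.toList
  let head := cs.takeWhile (· ≠ '-')
  let sep : List Char := if '-' ∈ cs then ['-'] else []
  attr_by_prefix.getD (String.ofList (head ++ sep)) "ip_address"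

-- ===== PRECONDITION & SPEC =====
def Spec_prefix_to_attr (attr_id : String) (out : String) : Prop := out = prefix_to_attr_alt attr_id
instance (attr_id : String) (out : String) : Decidable (Spec_prefix_to_attr attr_id out) := by unfold Spec_prefix_to_attr; infer_instance

-- ===== CLAIM (what is proved, stated in full; the proofs are below) =====
def Claim_equal_prefix_to_attr : Prop := ∀ (attr_id : String), Dom_prefix_to_attr attr_id → Spec_prefix_to_attr attr_id (prefix_to_attr attr_id)

-- ===== LEMMAS AND PROOFS =====

-- the key B looks up, on the character-list side
def pvKey (cs : List Char) : List Char :=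
  cs.takeWhile (· ≠ '-') ++ (if '-' ∈ cs then ['-'] else [])

lemma pvKey_cons_dash (cs : List Char) : pvKey ('-' :: cs) = ['-'] := by
  simp [pvKey]

lemma pvKey_cons (c : Char) (cs : List Char) (h : c ≠ '-') :
    pvKey (c :: cs) = c :: pvKey cs := by
  simp [pvKey, h, Ne.symm h]

-- a dash-free token followed by '-' is a prefix of cs iff B's key is exactly that token + '-'
lemma key_eq_iff (cs t : List Char) (ht : '-' ∉ t) :
    (t ++ ['-']) <+: cs ↔ pvKey cs = t ++ ['-'] := by
  induction cs generalizing t with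
  | nil => simp [pvKey]
  | cons c cs ih =>
    by_cases hc : c = '-'
    · subst hc
      rw [pvKey_cons_dash]
      cases t with
      | nil => simp
      | cons a t' =>
        have ha : a ≠ '-' := fun h => ht (h ▸ List.mem_cons_self)
        simp [List.cons_prefix_cons, Ne.symm ha, ha]
    · rw [pvKey_cons c cs hc]
      cases t with
      | nil => simp [List.cons_prefix_cons, Ne.symm hc, hc]
      | cons a t' =>
        have ht' : '-' ∉ t' := fun h => ht (List.mem_cons_of_mem _ h)
        simp only [List.cons_append, List.cons_prefix_cons, List.cons.injEq]
        rw [ih t' ht']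
        constructor
        · rintro ⟨h, h2⟩; exact ⟨h.symm, h2⟩
        · rintro ⟨h, h2⟩; exact ⟨h.symm, h2⟩

lemma startswith_eq_key (cs t : List Char) (ht : '-' ∉ t) :
    PySem.Chars.startswith cs (t ++ ['-']) = decide (pvKey cs = t ++ ['-']) := by
  by_cases h : (t ++ ['-']) <+: cs
  · have h2 := (key_eq_iff cs t ht).mp h
    rw [(PySem.Chars.startswith_iff cs (t ++ ['-'])).mpr h]
    simp [h2]
  · have h2 : pvKey cs ≠ t ++ ['-'] := fun he => h ((key_eq_iff cs t ht).mpr he)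
    have h3 : PySem.Chars.startswith cs (t ++ ['-']) = false := by
      rcases hb : PySem.Chars.startswith cs (t ++ ['-']) with _ | _
      · rfl
      · exact absurd ((PySem.Chars.startswith_iff _ _).mp hb) h
    rw [h3]
    exact (decide_eq_false h2).symm

lemma beq_ofList (lit : String) (l : List Char) :
    (lit == String.ofList l) = decide (l = lit.toList) := by
  by_cases h : l = lit.toList
  · subst h
    simp [String.ofList_toList]
  · have hne : lit ≠ String.ofList l := by
      intro he
      apply h
      rw [he, String.toList_ofList]
    simp [hne, h]

-- ===== VERDICT (by name: the statement is the Claim_ definition above) =====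
theorem prefix_to_attr_spec : Claim_equal_prefix_to_attr := by
  intro s _
  unfold Spec_prefix_to_attr prefix_to_attr prefix_to_attr_alt first_or_default
  have hd : (PySem.Dict.ofList [("fsmt-", "mount_target_id"), ("subnet-", "subnet_id"),
      ("eni-", "network_interface_id"), ("sg-", "security_groups")] : PySem.Dict String String)
      = PySem.Dict.mk [("fsmt-", "mount_target_id"), ("subnet-", "subnet_id"),
      ("eni-", "network_interface_id"), ("sg-", "security_groups")] := by rfl
  have h1 := startswith_eq_key s.toList "fsmt".toList (by decide)
  have h2 := startswith_eq_key s.toList "subnet".toList (by decide)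
  have h3 := startswith_eq_key s.toList "eni".toList (by decide)
  have h4 := startswith_eq_key s.toList "sg".toList (by decide)
  simp only [show ("fsmt".toList ++ ['-']) = "fsmt-".toList from rfl,
    show ("subnet".toList ++ ['-']) = "subnet-".toList from rfl,
    show ("eni".toList ++ ['-']) = "eni-".toList from rfl,
    show ("sg".toList ++ ['-']) = "sg-".toList from rfl] at h1 h2 h3 h4
  have hkey : (s.toList.takeWhile (· ≠ '-') ++ (if '-' ∈ s.toList then ['-'] else [])) = pvKey s.toList := rfl
  simp only [hd, hkey, PySem.Dict.getD, PySem.Dict.get?_mk_cons,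
    PySem.Str.startswith_eq, List.filter, h1, h2, h3, h4, beq_ofList]
  by_cases k1 : pvKey s.toList = "fsmt-".toList
  · rw [decide_eq_true k1]; rfl
  · rw [decide_eq_false k1]
    by_cases k2 : pvKey s.toList = "subnet-".toList
    · rw [decide_eq_true k2]; rfl
    · rw [decide_eq_false k2]
      by_cases k3 : pvKey s.toList = "eni-".toList
      · rw [decide_eq_true k3]; rfl
      · rw [decide_eq_false k3]
        by_cases k4 : pvKey s.toList = "sg-".toList
        · rw [decide_eq_true k4]; rfl
        · rw [decide_eq_false k4]; rfl
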